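-- pv_equiv track=rewrite | github.com/nguyenngochuy91/Relevant-Operon | analyze.py | computePairWiseDistance
-- ===== SOURCE A (Python) =====
-- from collections import Counter
--
-- def computeDeletion(string1,string2):
--     s1 = set(string1)
--     s2 = set(string2)
--     try:
--         s1.remove("|")
--     except:
--         pass
--     try:
--         s2.remove("|")
--     except:
--         pass
--     return len(s1.symmetric_difference(s2))
--
-- def computeSplit(string1,string2):
--     string1 = string1.split("|")
--     string2 = string2.split("|")
--     return abs(len(string1)-len(string2))
--
-- def computeDuplication(string1,string2):
--     string1,string2 = string1.split("|"),string2.split("|")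
--     duplicated1,duplicated2= set(),set()
--     for block in string1:
--         c = Counter(block)
--         for item in c:
--             if c[item]>=2:
--                 duplicated1.add(item)
--     for block in string2:
--         c = Counter(block)
--         for item in c:
--             if c[item]>=2:
--                 duplicated2.add(item)
-- #    print (duplicated1,duplicated2)
--     return len(duplicated1.symmetric_difference(duplicated2))
--
-- def computePairWiseDistance(dictionary,geneSet):
--     pairWiseDistance = [0,0,0]
--     distance = [0,0,0]
--     myList   = list(dictionary.keys())
-- #    print (dictionary)
--     for i in range(len(myList)-1):
--         currentGeneBlock = dictionary[myList[i]]
--         numBlock = len(currentGeneBlock.split("|"))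
--         genes = set(currentGeneBlock)
--         try:
--             genes.remove("|")
--         except:
--             pass
--         deletion = len(geneSet)-len(genes)
--         split    = abs(numBlock-1)
--         distance[0] += deletion
--         distance[2] += split
--         for j in range(i+1,len(myList)):
--             nextGeneBlock =dictionary[myList[j]]
--             deletion     = computeDeletion(currentGeneBlock,nextGeneBlock)
--             dup          = computeDuplication(currentGeneBlock,nextGeneBlock)
--             split        = computeSplit(currentGeneBlock,nextGeneBlock)
--             pairWiseDistance[0]+=deletion
--             pairWiseDistance[1]+= dup
--             pairWiseDistance[2]+=split
--     return pairWiseDistance,distance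
-- ===== SOURCE B (Python) =====
-- def _feat(s):
--     blocks = s.split("|")
--     genes = set(s)
--     genes.discard("|")
--     dup = set()
--     for block in blocks:
--         seen = set()
--         for ch in block:
--             if ch in seen:
--                 dup.add(ch)
--             seen.add(ch)
--     return genes, dup, len(blocks)
--
-- def _count_sum(sets, N):
--     cnt = {}
--     for s in sets:
--         for c in s:
--             cnt[c] = cnt.get(c, 0) + 1
--     return sum(k * (N - k) for k in cnt.values())
--
-- def computePairWiseDistance(dictionary, geneSet):
--     values = list(dictionary.values())
--     N = len(values)
--     feats = [_feat(s) for s in values]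
--
--     delSum = _count_sum([f[0] for f in feats], N)
--     dupSum = _count_sum([f[1] for f in feats], N)
--
--     ns = sorted(f[2] for f in feats)
--     splitSum = 0
--     pref = 0
--     for i, n in enumerate(ns):
--         splitSum += i * n - pref
--         pref += n
--
--     distance = [0, 0, 0]
--     for genes, _, n in feats[:-1]:
--         distance[0] += len(geneSet) - len(genes)
--         distance[2] += abs(n - 1)
--     return [delSum, dupSum, splitSum], distance
-- ===== Notes on version B (the rewrite author's own statement) =====
-- stated objective: faster
-- what changed: Instead of recomputing set/Counter/split features inside an O(n^2) double loop over all pairs, B extracts each value's feature triple once, obtains both symmetric-difference totals from per-gene occurrence counts via the sum of cnt*(N-cnt), and the |blocks_i - blocks_j| total by sorting the block counts and a prefix-sum pass.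
import Mathlib
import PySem

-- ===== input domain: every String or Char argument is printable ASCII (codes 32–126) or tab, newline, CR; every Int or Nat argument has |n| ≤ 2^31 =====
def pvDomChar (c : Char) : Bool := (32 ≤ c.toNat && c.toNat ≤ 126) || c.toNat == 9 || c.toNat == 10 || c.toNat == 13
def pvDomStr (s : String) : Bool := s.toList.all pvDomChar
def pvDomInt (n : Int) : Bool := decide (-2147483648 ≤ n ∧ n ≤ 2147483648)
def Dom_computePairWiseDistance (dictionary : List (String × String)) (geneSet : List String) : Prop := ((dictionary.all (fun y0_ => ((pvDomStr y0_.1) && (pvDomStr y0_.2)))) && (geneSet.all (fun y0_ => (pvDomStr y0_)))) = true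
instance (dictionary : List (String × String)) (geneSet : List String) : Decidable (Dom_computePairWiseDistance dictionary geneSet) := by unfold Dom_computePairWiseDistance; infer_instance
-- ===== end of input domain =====

-- B replaces A's all-pairs O(n²·L) recomputation by per-gene occurrence counting (cnt·(N−cnt) sums
-- for the two symmetric-difference totals) and a sort + prefix-sum pass for the |·|-difference total.

-- ===== PORT A =====
def computeDeletion (string1 string2 : String) : Int :=
  let s1 := PySem.Set.discard (PySem.Set.ofList string1.toList) '|'
  let s2 := PySem.Set.discard (PySem.Set.ofList string2.toList) '|'
  ((PySem.Set.symmDiff s1 s2).length : Int)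

def computeSplit (string1 string2 : String) : Int :=
  |((PySem.Chars.splitOn string1.toList ['|']).length : Int) -
    ((PySem.Chars.splitOn string2.toList ['|']).length : Int)|

def computeDuplication (string1 string2 : String) : Int :=
  let blocks1 := PySem.Chars.splitOn string1.toList ['|']
  let blocks2 := PySem.Chars.splitOn string2.toList ['|']
  let duplicated1 := blocks1.foldl (fun dup block =>
    let c := PySem.Dict.counter block
    c.keys.foldl (fun dup item => if 2 ≤ c.getD item 0 then PySem.Set.add dup item else dup) dup)
    PySem.Set.empty
  let duplicated2 := blocks2.foldl (fun dup block =>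
    let c := PySem.Dict.counter block
    c.keys.foldl (fun dup item => if 2 ≤ c.getD item 0 then PySem.Set.add dup item else dup) dup)
    PySem.Set.empty
  ((PySem.Set.symmDiff duplicated1 duplicated2).length : Int)

def computePairWiseDistance (dictionary : List (String × String)) (geneSet : List String) :
    List Int × List Int :=
  let d := PySem.Dict.ofList dictionary
  let myList := d.keys
  let st := (PySem.List.pyRange 0 ((myList.length : Int) - 1)).foldl
    (fun (st : (Int × Int × Int) × (Int × Int × Int)) i =>
      let currentGeneBlock := d.getD (PySem.List.pyGetD myList i "") ""
      let numBlock := (PySem.Chars.splitOn currentGeneBlock.toList ['|']).length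
      let genes := PySem.Set.discard (PySem.Set.ofList currentGeneBlock.toList) '|'
      let deletion : Int := (geneSet.length : Int) - (genes.length : Int)
      let split : Int := |(numBlock : Int) - 1|
      let dist := (st.2.1 + deletion, st.2.2.1, st.2.2.2 + split)
      let pw := (PySem.List.pyRange (i + 1) (myList.length : Int)).foldl
        (fun (pw : Int × Int × Int) j =>
          let nextGeneBlock := d.getD (PySem.List.pyGetD myList j "") ""
          (pw.1 + computeDeletion currentGeneBlock nextGeneBlock,
           pw.2.1 + computeDuplication currentGeneBlock nextGeneBlock,
           pw.2.2 + computeSplit currentGeneBlock nextGeneBlock)) st.1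
      (pw, dist)) ((0, 0, 0), (0, 0, 0))
  ([st.1.1, st.1.2.1, st.1.2.2], [st.2.1, st.2.2.1, st.2.2.2])

-- ===== PORT B =====
def pvFeat (s : String) : PySem.Set Char × PySem.Set Char × Int :=
  let blocks := PySem.Chars.splitOn s.toList ['|']
  let genes := PySem.Set.discard (PySem.Set.ofList s.toList) '|'
  let dup := blocks.foldl (fun dup block =>
    (block.foldl (fun (p : PySem.Set Char × PySem.Set Char) ch =>
      ((if PySem.Set.contains p.2 ch then PySem.Set.add p.1 ch else p.1), PySem.Set.add p.2 ch))
      (dup, PySem.Set.empty)).1) PySem.Set.empty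
  (genes, dup, (blocks.length : Int))

def pvCountSum (sets : List (PySem.Set Char)) (N : Int) : Int :=
  let cnt := sets.foldl (fun d s =>
    s.foldl (fun (d : PySem.Dict Char Int) c => d.insert c (d.getD c 0 + 1)) d) PySem.Dict.empty
  (cnt.values.map (fun k => k * (N - k))).sum

def computePairWiseDistance_alt (dictionary : List (String × String)) (geneSet : List String) :
    List Int × List Int :=
  let values := (PySem.Dict.ofList dictionary).values
  let N : Int := (values.length : Int)
  let feats := values.map pvFeat
  let delSum := pvCountSum (feats.map (fun f => f.1)) N
  let dupSum := pvCountSum (feats.map (fun f => f.2.1)) N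
  let ns := PySem.List.sorted (feats.map (fun f => f.2.2)) (fun x => x)
  let st := (PySem.List.enumerate ns).foldl
    (fun (st : Int × Int) p => (st.1 + p.1 * p.2 - st.2, st.2 + p.2)) (0, 0)
  let dist := (PySem.List.slice feats none (some (-1))).foldl
    (fun (t : Int × Int × Int) f =>
      (t.1 + ((geneSet.length : Int) - PySem.Set.len f.1), t.2.1, t.2.2 + |f.2.2 - 1|))
    (0, 0, 0)
  ([delSum, dupSum, st.1], [dist.1, dist.2.1, dist.2.2])

-- ===== PRECONDITION & SPEC =====
def Spec_computePairWiseDistance (dictionary : List (String × String)) (geneSet : List String) (out : List Int × List Int) : Prop := out = computePairWiseDistance_alt dictionary geneSet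
instance (dictionary : List (String × String)) (geneSet : List String) (out : List Int × List Int) : Decidable (Spec_computePairWiseDistance dictionary geneSet out) := by unfold Spec_computePairWiseDistance; infer_instance

-- ===== CLAIM (what is proved, stated in full; the proofs are below) =====
def Claim_equal_computePairWiseDistance : Prop := ∀ (dictionary : List (String × String)) (geneSet : List String), Dom_computePairWiseDistance dictionary geneSet → Spec_computePairWiseDistance dictionary geneSet (computePairWiseDistance dictionary geneSet)

-- ===== LEMMAS AND PROOFS =====

def pvGenes (s : String) : PySem.Set Char := PySem.Set.discard (PySem.Set.ofList s.toList) '|'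

def pvNumB (s : String) : Int := ((PySem.Chars.splitOn s.toList ['|']).length : Int)

def pvDupA (s : String) : PySem.Set Char :=
  (PySem.Chars.splitOn s.toList ['|']).foldl (fun dup block =>
    let c := PySem.Dict.counter block
    c.keys.foldl (fun dup item => if 2 ≤ c.getD item 0 then PySem.Set.add dup item else dup) dup)
    PySem.Set.empty

def pvSymd (s t : PySem.Set Char) : Int := ((PySem.Set.symmDiff s t).length : Int)

def pvPairsum {α : Type} (f : α → α → Int) : List α → Int
  | [] => 0
  | x :: r => (r.map (f x)).sum + pvPairsum f r

def pvCnt (σs : List (PySem.Set Char)) (c : Char) : Int := (σs.countP (fun s => decide (c ∈ s)) : Int)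

def pvCSum (C : List Char) (σs : List (PySem.Set Char)) (N : Int) : Int :=
  (C.map (fun c => pvCnt σs c * (N - pvCnt σs c))).sum

def pvPairsumSub : List Int → Int
  | [] => 0
  | x :: r => (r.sum - (r.length : Int) * x) + pvPairsumSub r

theorem pv_symd_eq (s t : PySem.Set Char) :
    pvSymd s t = (s.countP (fun c => !t.contains c) : Int) + (t.countP (fun c => !s.contains c) : Int) := by
  simp [pvSymd, PySem.Set.symmDiff, PySem.Set.diff, List.countP_eq_length_filter]

theorem pv_sum_ite_one_zero_nat {α : Type} (s : List α) (q : α → Bool) :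
    (s.map (fun c => if q c then 1 else 0)).sum = s.countP q := by
  induction s with
  | nil => simp
  | cons a s ih => by_cases h : q a <;> simp [List.countP_cons, h, ih] <;> omega

theorem pv_dc {α β : Type} (r : List β) (s : List α) (P : α → β → Bool) :
    (r.map (fun t => s.countP (fun c => P c t))).sum = (s.map (fun c => r.countP (fun t => P c t))).sum := by
  induction r with
  | nil => simp
  | cons t r ih =>
    simp only [List.map_cons, List.sum_cons, ih, List.countP_cons]
    rw [List.sum_map_add, pv_sum_ite_one_zero_nat]
    omega

theorem pv_countP_compl {α : Type} (l : List α) (p : α → Bool) :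
    l.countP (fun x => !p x) = l.length - l.countP p := by
  have h := List.length_eq_countP_add_countP (l := l) p
  have h2 : l.countP (fun a => decide ¬p a = true) = l.countP (fun x => !p x) := by
    apply List.countP_congr; intro x _; simp
  omega

theorem pv_sum_map_ite {α : Type} (C : List α) (p : α → Bool) (f g : α → Int) :
    (C.map (fun c => if p c then f c else g c)).sum
      = ((C.filter p).map f).sum + ((C.filter (fun c => !p c)).map g).sum := by
  induction C with
  | nil => simp
  | cons c C ih => by_cases h : p c <;> simp [h, ih] <;> ring

theorem pv_sum_mem_iff {α : Type} {l₁ l₂ : List α} (f : α → Int) (h₁ : l₁.Nodup) (h₂ : l₂.Nodup)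
    (h : ∀ x, x ∈ l₁ ↔ x ∈ l₂) : (l₁.map f).sum = (l₂.map f).sum :=
  (((List.perm_ext_iff_of_nodup h₁ h₂).2 h).map f).sum_eq

theorem pv_len_mem_iff {α : Type} {l₁ l₂ : List α} (h₁ : l₁.Nodup) (h₂ : l₂.Nodup)
    (h : ∀ x, x ∈ l₁ ↔ x ∈ l₂) : l₁.length = l₂.length :=
  ((List.perm_ext_iff_of_nodup h₁ h₂).2 h).length_eq

theorem pv_cast_sum {α : Type} (l : List α) (g : α → Nat) :
    (l.map (fun x => ((g x : Nat) : Int))).sum = (((l.map g).sum : Nat) : Int) := by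
  induction l with
  | nil => simp
  | cons a l ih => simp [ih]

theorem pv_sym_main (σs : List (PySem.Set Char)) (C : List Char)
    (hσ : ∀ s ∈ σs, s.Nodup) (hC : C.Nodup) (hsub : ∀ s ∈ σs, ∀ c ∈ s, c ∈ C) :
    pvPairsum pvSymd σs = pvCSum C σs (σs.length : Int) := by
  induction σs with
  | nil => simp [pvPairsum, pvCSum, pvCnt]
  | cons s r ih =>
    have hs : s.Nodup := hσ s (List.mem_cons_self)
    have hr : ∀ t ∈ r, t.Nodup := fun t ht => hσ t (List.mem_cons_of_mem _ ht)
    have hsubr : ∀ t ∈ r, ∀ c ∈ t, c ∈ C := fun t ht => hsub t (List.mem_cons_of_mem _ ht)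
    have hsC : ∀ c ∈ s, c ∈ C := hsub s (List.mem_cons_self)
    set N : Int := (r.length : Int) with hN
    have hcc : ∀ c, ((r.countP (fun t => !t.contains c) : Nat) : Int) = N - pvCnt r c := by
      intro c
      have h1 : r.countP (fun t => t.contains c) = r.countP (fun t => decide (c ∈ t)) :=
        List.countP_congr (fun t _ => by simp [PySem.Set.contains_iff])
      have h2 := pv_countP_compl r (fun t => t.contains c)
      have h3 : r.countP (fun t => decide (c ∈ t)) ≤ r.length := List.countP_le_length
      simp only [pvCnt, hN, h2, h1]
      omega
    have hstep : pvCSum C (s :: r) ((s::r).length : Int)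
        = pvCSum C r N + (C.map (fun c => if c ∈ s then N - pvCnt r c else pvCnt r c)).sum := by
      unfold pvCSum
      rw [← List.sum_map_add]
      congr 1
      apply List.map_congr_left
      intro c _
      have hc : pvCnt (s :: r) c = pvCnt r c + (if c ∈ s then 1 else 0) := by
        simp only [pvCnt, List.countP_cons]
        by_cases h : c ∈ s <;> simp [h]
      by_cases h : c ∈ s <;>
        simp only [hc, h, if_true, if_false, List.length_cons] <;> push_cast <;> ring
    have hpart1 : (r.map (fun t => ((s.countP (fun c => !t.contains c) : Nat) : Int))).sum
        = ((C.filter (fun c => decide (c ∈ s))).map (fun c => N - pvCnt r c)).sum := by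
      rw [pv_cast_sum, pv_dc r s (fun c t => !t.contains c), ← pv_cast_sum]
      rw [List.map_congr_left (fun c _ => hcc c)]
      have hmem : ∀ x, x ∈ C.filter (fun c => decide (c ∈ s)) ↔ x ∈ s := by
        intro x
        simp only [List.mem_filter, decide_eq_true_eq]
        exact ⟨fun h => h.2, fun h => ⟨hsC x h, h⟩⟩
      exact (pv_sum_mem_iff _ (hC.filter _) hs hmem).symm
    have hpart2 : (r.map (fun t => ((t.countP (fun c => !s.contains c) : Nat) : Int))).sum
        = ((C.filter (fun c => !decide (c ∈ s))).map (fun c => pvCnt r c)).sum := by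
      have hper : ∀ t ∈ r, t.countP (fun c => !s.contains c)
          = C.countP (fun c => t.contains c && !s.contains c) := by
        intro t ht
        rw [List.countP_eq_length_filter, List.countP_eq_length_filter]
        apply pv_len_mem_iff ((hr t ht).filter _) (hC.filter _)
        intro x
        simp only [List.mem_filter, Bool.not_eq_eq_eq_not, Bool.not_true, Bool.and_eq_true,
          PySem.Set.contains_iff, Bool.not_eq_true]
        constructor
        · rintro ⟨hxt, hxs⟩
          refine ⟨hsubr t ht x hxt, ?_, hxs⟩
          simpa [PySem.Set.contains_iff] using hxt
        · rintro ⟨_, hxt, hxs⟩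
          exact ⟨by simpa [PySem.Set.contains_iff] using hxt, hxs⟩
      rw [List.map_congr_left (fun t ht => by rw [hper t ht])]
      rw [pv_cast_sum, pv_dc r C (fun c t => t.contains c && !s.contains c), ← pv_cast_sum]
      have hper2 : ∀ c ∈ C, ((r.countP (fun t => t.contains c && !s.contains c) : Nat) : Int)
          = (if c ∈ s then (0 : Int) else pvCnt r c) := by
        intro c _
        by_cases h : c ∈ s
        · have : r.countP (fun t => t.contains c && !s.contains c) = r.countP (fun _ => false) :=
            List.countP_congr (fun t _ => by simp [PySem.Set.contains_iff, h])
          simp [this, h]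
        · have : r.countP (fun t => t.contains c && !s.contains c) = r.countP (fun t => decide (c ∈ t)) :=
            List.countP_congr (fun t _ => by simp [PySem.Set.contains_iff, h])
          simp [this, h, pvCnt]
      rw [List.map_congr_left hper2]
      rw [show (fun a => if a ∈ s then (0:Int) else pvCnt r a)
            = (fun a => if decide (a ∈ s) = true then (0:Int) else pvCnt r a) from
          funext (fun a => by simp)]
      rw [pv_sum_map_ite C (fun c => decide (c ∈ s)) (fun _ => (0:Int)) (fun c => pvCnt r c)]
      simp
    have hrow : (C.map (fun c => if c ∈ s then N - pvCnt r c else pvCnt r c)).sum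
        = (r.map (pvSymd s)).sum := by
      have : (r.map (pvSymd s)).sum
          = (r.map (fun t => ((s.countP (fun c => !t.contains c) : Nat) : Int))).sum
            + (r.map (fun t => ((t.countP (fun c => !s.contains c) : Nat) : Int))).sum := by
        rw [← List.sum_map_add]
        congr 1
        exact List.map_congr_left (fun t _ => pv_symd_eq s t)
      rw [this, hpart1, hpart2]
      have := pv_sum_map_ite C (fun c => decide (c ∈ s)) (fun c => N - pvCnt r c) (fun c => pvCnt r c)
      rw [← this]
      congr 1
      apply List.map_congr_left
      intro c _
      by_cases h : c ∈ s <;> simp [h]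
    show (r.map (pvSymd s)).sum + pvPairsum pvSymd r = _
    rw [ih hr hsubr, hstep, hrow]
    ring

theorem pv_count_flatten (sets : List (PySem.Set Char)) (hnd : ∀ s ∈ sets, s.Nodup) (c : Char) :
    sets.flatten.count c = sets.countP (fun s => decide (c ∈ s)) := by
  induction sets with
  | nil => simp
  | cons s r ih =>
    have hs : s.Nodup := hnd s (List.mem_cons_self)
    have hr : ∀ t ∈ r, t.Nodup := fun t ht => hnd t (List.mem_cons_of_mem _ ht)
    simp only [List.flatten_cons, List.count_append, List.countP_cons, ih hr]
    by_cases h : c ∈ s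
    · rw [List.count_eq_one_of_mem hs h]; simp [h]; omega
    · rw [List.count_eq_zero_of_not_mem h]; simp [h]

theorem pv_countsum_eq (sets : List (PySem.Set Char)) (N : Int) (hnd : ∀ s ∈ sets, s.Nodup) :
    pvCountSum sets N = pvCSum (PySem.Set.ofList sets.flatten) sets N := by
  unfold pvCountSum pvCSum
  have h1 : sets.foldl (fun d s =>
      s.foldl (fun (d : PySem.Dict Char Int) c => d.insert c (d.getD c 0 + 1)) d) PySem.Dict.empty
      = PySem.Dict.counter sets.flatten := by
    rw [← PySem.Dict.foldl_insert_getD_add_one_eq_counter, List.foldl_flatten]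
  rw [h1]
  simp only []
  show (List.map (fun k => k * (N - k)) (PySem.Dict.counter sets.flatten).values).sum = _
  have h2 : (PySem.Dict.counter sets.flatten).values
      = (PySem.Set.ofList sets.flatten).map (fun k => ((sets.flatten.count k : Nat) : Int)) := by
    show ((PySem.Dict.counter sets.flatten).items).map (fun p => p.2) = _
    rw [PySem.Dict.items_counter, List.map_map]
    rfl
  rw [h2, List.map_map]
  congr 1
  apply List.map_congr_left
  intro c _
  simp only [Function.comp, pvCnt, pv_count_flatten sets hnd c]

theorem pv_csum_bridge (vs : List String) (f g : String → PySem.Set Char) (N : Int)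
    (hmem : ∀ s y, y ∈ f s ↔ y ∈ g s) (hnf : ∀ s, (f s).Nodup) (hng : ∀ s, (g s).Nodup) :
    pvCSum (PySem.Set.ofList (vs.map f).flatten) (vs.map f) N
      = pvCSum (PySem.Set.ofList (vs.map g).flatten) (vs.map g) N := by
  have hcnt : ∀ c, pvCnt (vs.map f) c = pvCnt (vs.map g) c := by
    intro c
    simp only [pvCnt, List.countP_map]
    congr 1
    apply List.countP_congr
    intro v _
    simp [Function.comp, hmem v c]
  unfold pvCSum
  simp only [hcnt]
  apply pv_sum_mem_iff _ (PySem.Set.nodup_ofList _) (PySem.Set.nodup_ofList _)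
  intro x
  simp only [PySem.Set.mem_ofList, List.mem_flatten, List.mem_map]
  constructor
  · rintro ⟨l, ⟨v, hv, rfl⟩, hx⟩
    exact ⟨g v, ⟨v, hv, rfl⟩, (hmem v x).1 hx⟩
  · rintro ⟨l, ⟨v, hv, rfl⟩, hx⟩
    exact ⟨f v, ⟨v, hv, rfl⟩, (hmem v x).2 hx⟩

theorem pv_enum_fold (l : List Int) : ∀ (k p a : Int),
    (PySem.List.enumerate l k).foldl (fun (st : Int × Int) q => (st.1 + q.1 * q.2 - st.2, st.2 + q.2)) (a, p)
      = (a + pvPairsumSub l + k * l.sum - (l.length : Int) * p, p + l.sum) := by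
  induction l with
  | nil => intro k p a; simp [PySem.List.enumerate, pvPairsumSub]
  | cons x r ih =>
    intro k p a
    simp only [PySem.List.enumerate, List.foldl_cons, pvPairsumSub, ih, List.sum_cons,
      List.length_cons]
    rw [Prod.mk.injEq]
    refine ⟨?_, ?_⟩ <;> push_cast <;> ring

theorem pv_abs_sorted (l : List Int) (h : l.Pairwise (· ≤ ·)) :
    pvPairsum (fun a b => |a - b|) l = pvPairsumSub l := by
  induction l with
  | nil => rfl
  | cons x r ih =>
    have hx : ∀ y ∈ r, x ≤ y := fun y hy => (List.pairwise_cons.1 h).1 y hy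
    show (r.map (fun b => |x - b|)).sum + _ = _
    rw [List.map_congr_left (fun y hy => show |x - y| = y - x by
      rw [abs_sub_comm]; exact abs_of_nonneg (by have := hx y hy; omega))]
    have hsum : (r.map (fun y => y - x)).sum = r.sum - (r.length : Int) * x := by
      have : (r.map (fun y => y + (-x))).sum = (r.map (fun y => y)).sum + (r.map (fun _ => -x)).sum :=
        PySem.List.sum_map_add_int r (fun y => y) (fun _ => -x)
      simp only [PySem.List.sum_map_const_int, List.map_id'] at this
      simpa [sub_eq_add_neg] using this.trans (by ring)
    rw [hsum, ih (List.pairwise_cons.1 h).2]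
    rfl

theorem pv_pairsum_perm {α : Type} (f : α → α → Int) (hf : ∀ a b, f a b = f b a)
    {l l' : List α} (h : l.Perm l') : pvPairsum f l = pvPairsum f l' := by
  induction h with
  | nil => rfl
  | cons x h ih =>
    simp only [pvPairsum, ih, (h.map (f x)).sum_eq]
  | swap x y l =>
    simp only [pvPairsum, List.map_cons, List.sum_cons]
    rw [hf y x]
    ring
  | trans h₁ h₂ ih₁ ih₂ => exact ih₁.trans ih₂

theorem pv_pairsum_map {α β : Type} (g : α → β) (f : β → β → Int) (l : List α) :
    pvPairsum f (l.map g) = pvPairsum (fun a b => f (g a) (g b)) l := by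
  induction l with
  | nil => rfl
  | cons x r ih => simp only [List.map_cons, pvPairsum, ih, List.map_map]; rfl

theorem pv_mem_foldl_addif {α : Type} [BEq α] [LawfulBEq α] (l : List α) (p : α → Prop)
    [DecidablePred p] : ∀ (s : PySem.Set α) (y : α),
    (y ∈ l.foldl (fun s x => if p x then PySem.Set.add s x else s) s ↔ y ∈ s ∨ (y ∈ l ∧ p y)) := by
  induction l with
  | nil => intro s y; simp
  | cons x l ih =>
    intro s y
    simp only [List.foldl_cons, ih, List.mem_cons]
    by_cases hx : p x
    · simp only [hx, if_true, PySem.Set.mem_add]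
      constructor
      · rintro (⟨h | rfl⟩ | h)
        · exact Or.inl h
        · exact Or.inr ⟨Or.inl rfl, hx⟩
        · exact Or.inr ⟨Or.inr h.1, h.2⟩
      · rintro (h | ⟨rfl | h, hp⟩)
        · exact Or.inl (Or.inl h)
        · exact Or.inl (Or.inr rfl)
        · exact Or.inr ⟨h, hp⟩
    · simp only [hx, if_false]
      constructor
      · rintro (h | h)
        · exact Or.inl h
        · exact Or.inr ⟨Or.inr h.1, h.2⟩
      · rintro (h | ⟨rfl | h, hp⟩)
        · exact Or.inl h
        · exact absurd hp hx
        · exact Or.inr ⟨h, hp⟩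

theorem pv_nodup_foldl_addif {α : Type} [BEq α] [LawfulBEq α] (l : List α) (p : α → Prop)
    [DecidablePred p] :
    ∀ (s : PySem.Set α), s.Nodup → (l.foldl (fun s x => if p x then PySem.Set.add s x else s) s).Nodup := by
  induction l with
  | nil => intro s hs; exact hs
  | cons x l ih =>
    intro s hs
    simp only [List.foldl_cons]
    by_cases hx : p x <;> simp only [hx, if_true, if_false]
    · exact ih _ (PySem.Set.nodup_add s x hs)
    · exact ih _ hs

theorem pv_mem_dupA (s : String) (y : Char) :
    y ∈ pvDupA s ↔ ∃ b ∈ PySem.Chars.splitOn s.toList ['|'], 2 ≤ b.count y := by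
  unfold pvDupA
  generalize PySem.Chars.splitOn s.toList ['|'] = blocks
  have key : ∀ (blocks : List (List Char)) (acc : PySem.Set Char),
      y ∈ blocks.foldl (fun dup block =>
        let c := PySem.Dict.counter block
        c.keys.foldl (fun dup item => if 2 ≤ c.getD item 0 then PySem.Set.add dup item else dup) dup) acc
      ↔ y ∈ acc ∨ ∃ b ∈ blocks, 2 ≤ b.count y := by
    intro blocks
    induction blocks with
    | nil => intro acc; simp
    | cons b r ih =>
      intro acc
      simp only [List.foldl_cons, ih, List.mem_cons]
      have hstep : y ∈ (PySem.Dict.counter b).keys.foldl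
          (fun dup item => if 2 ≤ (PySem.Dict.counter b).getD item 0 then PySem.Set.add dup item else dup) acc
          ↔ y ∈ acc ∨ 2 ≤ b.count y := by
        rw [pv_mem_foldl_addif (PySem.Dict.counter b).keys
          (fun item => 2 ≤ (PySem.Dict.counter b).getD item 0) acc y]
        simp only [PySem.Dict.keys_counter, PySem.Set.mem_ofList, PySem.Dict.getD_counter]
        constructor
        · rintro (h | ⟨_, h2⟩)
          · exact Or.inl h
          · right; exact_mod_cast h2
        · rintro (h | h2)
          · exact Or.inl h
          · right
            refine ⟨List.count_pos_iff.1 (by omega), by exact_mod_cast h2⟩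
      rw [hstep]
      constructor
      · rintro (⟨h | h⟩ | ⟨t, ht, h2⟩)
        · exact Or.inl h
        · exact Or.inr ⟨b, Or.inl rfl, h⟩
        · exact Or.inr ⟨t, Or.inr ht, h2⟩
      · rintro (h | ⟨t, rfl | ht, h2⟩)
        · exact Or.inl (Or.inl h)
        · exact Or.inl (Or.inr h2)
        · exact Or.inr ⟨t, ht, h2⟩
  rw [key]
  simp

theorem pv_nodup_dupA (s : String) : (pvDupA s).Nodup := by
  unfold pvDupA
  generalize PySem.Chars.splitOn s.toList ['|'] = blocks
  have key : ∀ (blocks : List (List Char)) (acc : PySem.Set Char), acc.Nodup →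
      (blocks.foldl (fun dup block =>
        let c := PySem.Dict.counter block
        c.keys.foldl (fun dup item => if 2 ≤ c.getD item 0 then PySem.Set.add dup item else dup) dup)
        acc).Nodup := by
    intro blocks
    induction blocks with
    | nil => intro acc h; exact h
    | cons b r ih =>
      intro acc h
      exact ih _ (pv_nodup_foldl_addif _ _ _ h)
  exact key blocks _ List.nodup_nil

theorem pv_dupB_inner (cs : List Char) : ∀ (dup seen : PySem.Set Char) (y : Char),
    y ∈ (cs.foldl (fun (p : PySem.Set Char × PySem.Set Char) ch =>
        ((if PySem.Set.contains p.2 ch then PySem.Set.add p.1 ch else p.1), PySem.Set.add p.2 ch))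
        (dup, seen)).1
      ↔ y ∈ dup ∨ (y ∈ seen ∧ y ∈ cs) ∨ 2 ≤ cs.count y := by
  induction cs with
  | nil => intro dup seen y; simp
  | cons ch cs ih =>
    intro dup seen y
    simp only [List.foldl_cons]
    by_cases hch : PySem.Set.contains seen ch <;>
      simp only [hch, if_true, if_false] <;> rw [ih] <;>
      simp only [PySem.Set.mem_add, List.mem_cons, List.count_cons]
    · by_cases hy : y = ch
      · subst hy
        have hs : y ∈ seen := (PySem.Set.contains_iff seen y).1 hch
        simp [hs]
      · have hne : ch ≠ y := fun h => hy h.symm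
        simp [hy, hne]
    · have hs : ch ∉ seen := by
        intro h; exact absurd ((PySem.Set.contains_iff seen ch).2 h) hch
      by_cases hy : y = ch
      · subst hy
        have h1 : y ∈ cs ↔ 0 < cs.count y := List.count_pos_iff.symm
        have h1 : 0 < cs.count y ↔ y ∈ cs := List.count_pos_iff
        simp only [beq_self_eq_true, if_true, hs, false_and, eq_self_iff_true, true_or, or_true,
          and_true, true_and, false_or, or_false]
        constructor
        · rintro (h | h | h)
          · exact Or.inl h
          · exact Or.inr (by have := h1.2 h; omega)
          · exact Or.inr (by omega)
        · rintro (h | h)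
          · exact Or.inl h
          · by_cases h2 : 2 ≤ cs.count y
            · exact Or.inr (Or.inr h2)
            · by_cases hc : y ∈ cs
              · exact Or.inr (Or.inl hc)
              · have hc0 : cs.count y = 0 := List.count_eq_zero.2 hc
                omega
      · have hne : ch ≠ y := fun h => hy h.symm
        simp [hy, hne]

theorem pv_dupB_inner_nodup (cs : List Char) : ∀ (dup seen : PySem.Set Char), dup.Nodup →
    ((cs.foldl (fun (p : PySem.Set Char × PySem.Set Char) ch =>
        ((if PySem.Set.contains p.2 ch then PySem.Set.add p.1 ch else p.1), PySem.Set.add p.2 ch))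
        (dup, seen)).1).Nodup := by
  induction cs with
  | nil => intro dup seen h; exact h
  | cons ch cs ih =>
    intro dup seen h
    simp only [List.foldl_cons]
    by_cases hch : PySem.Set.contains seen ch <;> simp only [hch, if_true, if_false]
    · exact ih _ _ (PySem.Set.nodup_add dup ch h)
    · exact ih _ _ h

theorem pv_mem_dupB (s : String) (y : Char) :
    y ∈ (pvFeat s).2.1 ↔ ∃ b ∈ PySem.Chars.splitOn s.toList ['|'], 2 ≤ b.count y := by
  show y ∈ (PySem.Chars.splitOn s.toList ['|']).foldl _ PySem.Set.empty ↔ _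
  generalize PySem.Chars.splitOn s.toList ['|'] = blocks
  have key : ∀ (blocks : List (List Char)) (acc : PySem.Set Char),
      y ∈ blocks.foldl (fun dup block =>
        (block.foldl (fun (p : PySem.Set Char × PySem.Set Char) ch =>
          ((if PySem.Set.contains p.2 ch then PySem.Set.add p.1 ch else p.1), PySem.Set.add p.2 ch))
          (dup, PySem.Set.empty)).1) acc
      ↔ y ∈ acc ∨ ∃ b ∈ blocks, 2 ≤ b.count y := by
    intro blocks
    induction blocks with
    | nil => intro acc; simp
    | cons b r ih =>
      intro acc
      simp only [List.foldl_cons, ih, pv_dupB_inner, List.mem_cons]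
      constructor
      · rintro (⟨h | ⟨h, _⟩ | h⟩ | ⟨t, ht, h2⟩)
        · exact Or.inl h
        · exact absurd h (by simp [PySem.Set.empty])
        · exact Or.inr ⟨b, Or.inl rfl, h⟩
        · exact Or.inr ⟨t, Or.inr ht, h2⟩
      · rintro (h | ⟨t, rfl | ht, h2⟩)
        · exact Or.inl (Or.inl h)
        · exact Or.inl (Or.inr (Or.inr h2))
        · exact Or.inr ⟨t, ht, h2⟩
  rw [key]
  simp

theorem pv_nodup_dupB (s : String) : ((pvFeat s).2.1).Nodup := by
  show ((PySem.Chars.splitOn s.toList ['|']).foldl _ PySem.Set.empty).Nodup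
  generalize PySem.Chars.splitOn s.toList ['|'] = blocks
  have key : ∀ (blocks : List (List Char)) (acc : PySem.Set Char), acc.Nodup →
      (blocks.foldl (fun dup block =>
        (block.foldl (fun (p : PySem.Set Char × PySem.Set Char) ch =>
          ((if PySem.Set.contains p.2 ch then PySem.Set.add p.1 ch else p.1), PySem.Set.add p.2 ch))
          (dup, PySem.Set.empty)).1) acc).Nodup := by
    intro blocks
    induction blocks with
    | nil => intro acc h; exact h
    | cons b r ih => intro acc h; exact ih _ (pv_dupB_inner_nodup b acc _ h)
  exact key blocks _ List.nodup_nil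

theorem pv_foldl_dist {α : Type} (l : List α) (f h : α → Int) :
    ∀ (s : Int × Int × Int),
    l.foldl (fun t x => (t.1 + f x, t.2.1, t.2.2 + h x)) s
      = (s.1 + (l.map f).sum, s.2.1, s.2.2 + (l.map h).sum) := by
  induction l with
  | nil => intro s; simp
  | cons x l ih =>
    intro s
    simp only [List.foldl_cons, ih, List.map_cons, List.sum_cons]
    simp only [Prod.mk.injEq]
    and_intros <;> first | ring | trivial

theorem pv_getD_append (pre r : List String) (x : String) :
    PySem.List.pyGetD (pre ++ x :: r) (pre.length : Int) "" = x := by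
  rw [PySem.List.pyGetD_natCast]
  rw [List.getD_eq_getElem?_getD, List.getElem?_append_right (Nat.le_refl pre.length)]
  simp

theorem pv_inner (full : List String) (cur : String) :
    ∀ (r pre : List String) (pw : Int × Int × Int), full = pre ++ r →
    (PySem.List.pyRange (pre.length : Int) ((pre.length : Int) + (r.length : Int))).foldl
      (fun (pw : Int × Int × Int) j =>
        let nxt := PySem.List.pyGetD full j ""
        (pw.1 + computeDeletion cur nxt, pw.2.1 + computeDuplication cur nxt,
         pw.2.2 + computeSplit cur nxt)) pw
    = (pw.1 + (r.map (computeDeletion cur)).sum,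
       pw.2.1 + (r.map (computeDuplication cur)).sum,
       pw.2.2 + (r.map (computeSplit cur)).sum) := by
  intro r
  induction r with
  | nil =>
    intro pre pw _
    rw [PySem.List.pyRange_one_eq_nil (by simp)]
    simp
  | cons x r ih =>
    intro pre pw hf
    rw [PySem.List.pyRange_one_cons (by simp only [List.length_cons]; push_cast; omega)]
    simp only [List.foldl_cons]
    rw [hf, pv_getD_append pre r x, ← hf]
    have hb1 : ((pre.length : Int) + 1) = (((pre ++ [x]).length : Nat) : Int) := by
      simp
    have hb2 : ((pre.length : Int) + ((x :: r).length : Int))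
        = (((pre ++ [x]).length : Nat) : Int) + (r.length : Int) := by
      push_cast; simp; ring
    rw [hb1, hb2, ih (pre ++ [x]) _ (by rw [hf]; simp)]
    simp only [List.map_cons, List.sum_cons]
    rw [Prod.mk.injEq, Prod.mk.injEq]
    refine ⟨by ring, by ring, by ring⟩

theorem pv_outer (G : Int) (full : List String) :
    ∀ (r pre : List String) (st : (Int × Int × Int) × (Int × Int × Int)), full = pre ++ r →
    (PySem.List.pyRange (pre.length : Int) ((pre.length : Int) + (r.length : Int) - 1)).foldl
      (fun (st : (Int × Int × Int) × (Int × Int × Int)) i =>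
        ((PySem.List.pyRange (i + 1) (full.length : Int)).foldl
          (fun (pw : Int × Int × Int) j =>
            (pw.1 + computeDeletion (PySem.List.pyGetD full i "") (PySem.List.pyGetD full j ""),
             pw.2.1 + computeDuplication (PySem.List.pyGetD full i "") (PySem.List.pyGetD full j ""),
             pw.2.2 + computeSplit (PySem.List.pyGetD full i "") (PySem.List.pyGetD full j ""))) st.1,
         (st.2.1 + (G - ((PySem.Set.discard (PySem.Set.ofList (PySem.List.pyGetD full i "").toList) '|').length : Int)),
          st.2.2.1,
          st.2.2.2 + |(((PySem.Chars.splitOn (PySem.List.pyGetD full i "").toList ['|']).length : Nat) : Int) - 1|))) st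
    = ((st.1.1 + pvPairsum computeDeletion r,
        st.1.2.1 + pvPairsum computeDuplication r,
        st.1.2.2 + pvPairsum computeSplit r),
       (st.2.1 + (r.dropLast.map (fun s => G - ((pvGenes s).length : Int))).sum,
        st.2.2.1,
        st.2.2.2 + (r.dropLast.map (fun s => |pvNumB s - 1|)).sum)) := by
  intro r
  induction r with
  | nil =>
    intro pre st _
    rw [PySem.List.pyRange_one_eq_nil (by simp)]
    simp [pvPairsum]
  | cons x r ih =>
    intro pre st hf
    by_cases hr : r = []
    · subst hr
      rw [PySem.List.pyRange_one_eq_nil (by simp)]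
      simp [pvPairsum]
    · rw [PySem.List.pyRange_one_cons
        (by simp only [List.length_cons]
            push_cast
            have : 0 < r.length := List.length_pos_iff.2 hr
            omega)]
      simp only [List.foldl_cons]
      rw [hf, pv_getD_append pre r x, ← hf]
      have hlen : (full.length : Int) = (((pre ++ [x]).length : Nat) : Int) + (r.length : Int) := by
        rw [hf]; push_cast; simp; ring
      have hinner := pv_inner full x r (pre ++ [x]) st.1 (by rw [hf]; simp)
      rw [← hlen] at hinner
      have hb1 : ((pre.length : Int) + 1) = (((pre ++ [x]).length : Nat) : Int) := by simp
      rw [hb1, hinner]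
      have hb2 : ((pre.length : Int) + ((x :: r).length : Int) - 1)
          = (((pre ++ [x]).length : Nat) : Int) + (r.length : Int) - 1 := by
        push_cast; simp; ring
      rw [hb2, ih (pre ++ [x]) _ (by rw [hf]; simp)]
      have hdrop : (x :: r).dropLast = x :: r.dropLast := List.dropLast_cons_of_ne_nil hr
      simp only [pvPairsum, hdrop, List.map_cons, List.sum_cons, pvGenes, pvNumB]
      simp only [Prod.mk.injEq]
      and_intros <;> first | ring | trivial

theorem pv_A_structural (dictionary : List (String × String)) (geneSet : List String) :
    computePairWiseDistance dictionary geneSet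
      = (let vs := (PySem.Dict.ofList dictionary).values
         ([pvPairsum computeDeletion vs, pvPairsum computeDuplication vs, pvPairsum computeSplit vs],
          [(vs.dropLast.map (fun s => (geneSet.length : Int) - ((pvGenes s).length : Int))).sum, 0,
           (vs.dropLast.map (fun s => |pvNumB s - 1|)).sum])) := by
  unfold computePairWiseDistance
  simp only []
  set d := PySem.Dict.ofList dictionary with hd
  set vs := d.values with hvsdef
  have hnodup : d.keys.Nodup := PySem.Dict.nodup_keys_ofList dictionary
  have hvs : vs = d.keys.map (fun k => d.getD k "") := PySem.Dict.values_eq_map_keys d hnodup ""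
  have hlen : d.keys.length = vs.length := by rw [hvs, List.length_map]
  have hacc : ∀ i : Int, 0 ≤ i → i < (d.keys.length : Int) →
      d.getD (PySem.List.pyGetD d.keys i "") "" = PySem.List.pyGetD vs i "" := by
    intro i h0 h1
    have h1' : i < (vs.length : Int) := by
      have : (vs.length : Int) = (d.keys.length : Int) := by exact_mod_cast hlen.symm
      omega
    rw [PySem.List.pyGetD_eq_getElem _ _ h0 h1, PySem.List.pyGetD_eq_getElem _ _ h0 h1']
    have hvi : vs[i.toNat]'(by omega) = d.getD (d.keys[i.toNat]'(by omega)) "" := by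
      simp only [hvs, List.getElem_map]
    rw [hvi]
  have hcong : (PySem.List.pyRange 0 ((d.keys.length : Int) - 1)).foldl
      (fun (st : (Int × Int × Int) × (Int × Int × Int)) i =>
        let currentGeneBlock := d.getD (PySem.List.pyGetD d.keys i "") ""
        let numBlock := (PySem.Chars.splitOn currentGeneBlock.toList ['|']).length
        let genes := PySem.Set.discard (PySem.Set.ofList currentGeneBlock.toList) '|'
        let deletion : Int := (geneSet.length : Int) - (genes.length : Int)
        let split : Int := |(numBlock : Int) - 1|
        let dist := (st.2.1 + deletion, st.2.2.1, st.2.2.2 + split)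
        let pw := (PySem.List.pyRange (i + 1) (d.keys.length : Int)).foldl
          (fun (pw : Int × Int × Int) j =>
            let nextGeneBlock := d.getD (PySem.List.pyGetD d.keys j "") ""
            (pw.1 + computeDeletion currentGeneBlock nextGeneBlock,
             pw.2.1 + computeDuplication currentGeneBlock nextGeneBlock,
             pw.2.2 + computeSplit currentGeneBlock nextGeneBlock)) st.1
        (pw, dist)) ((0, 0, 0), (0, 0, 0))
      = (PySem.List.pyRange ((([] : List String).length : Int))
            ((([] : List String).length : Int) + (vs.length : Int) - 1)).foldl
      (fun (st : (Int × Int × Int) × (Int × Int × Int)) i =>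
        ((PySem.List.pyRange (i + 1) (vs.length : Int)).foldl
          (fun (pw : Int × Int × Int) j =>
            (pw.1 + computeDeletion (PySem.List.pyGetD vs i "") (PySem.List.pyGetD vs j ""),
             pw.2.1 + computeDuplication (PySem.List.pyGetD vs i "") (PySem.List.pyGetD vs j ""),
             pw.2.2 + computeSplit (PySem.List.pyGetD vs i "") (PySem.List.pyGetD vs j ""))) st.1,
         (st.2.1 + ((geneSet.length : Int) - ((PySem.Set.discard (PySem.Set.ofList (PySem.List.pyGetD vs i "").toList) '|').length : Int)),
          st.2.2.1,
          st.2.2.2 + |(((PySem.Chars.splitOn (PySem.List.pyGetD vs i "").toList ['|']).length : Nat) : Int) - 1|))) ((0, 0, 0), (0, 0, 0)) := by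
    have hb : ((d.keys.length : Int) - 1) = ((([] : List String).length : Int) + (vs.length : Int) - 1) := by
      simp [hlen]
    rw [hb]
    apply PySem.List.foldl_congr_mem
    intro acc i hi
    obtain ⟨hi0, hi1⟩ := PySem.List.mem_pyRange_one.1 hi
    simp only [List.length_nil, Nat.cast_zero, zero_add] at hi0 hi1
    have hiK : i < (d.keys.length : Int) := by omega
    simp only []
    rw [hacc i hi0 hiK]
    have hbound : ((d.keys.length : Nat) : Int) = ((vs.length : Nat) : Int) := by exact_mod_cast hlen
    rw [hbound]
    congr 1
    apply PySem.List.foldl_congr_mem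
    intro pw j hj
    obtain ⟨hj0, hj1⟩ := PySem.List.mem_pyRange_one.1 hj
    rw [hacc j (by omega) (by omega)]
  rw [hcong, pv_outer (geneSet.length : Int) vs vs [] _ (by simp)]
  simp [pvGenes, pvNumB]

theorem pv_B_structural (dictionary : List (String × String)) (geneSet : List String) :
    computePairWiseDistance_alt dictionary geneSet
      = (let vs := (PySem.Dict.ofList dictionary).values
         ([pvPairsum computeDeletion vs, pvPairsum computeDuplication vs, pvPairsum computeSplit vs],
          [(vs.dropLast.map (fun s => (geneSet.length : Int) - ((pvGenes s).length : Int))).sum, 0,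
           (vs.dropLast.map (fun s => |pvNumB s - 1|)).sum])) := by
  unfold computePairWiseDistance_alt
  simp only []
  set vs := (PySem.Dict.ofList dictionary).values with hvs
  -- deletion sum
  have hmapg : (vs.map pvFeat).map (fun f => f.1) = vs.map pvGenes := by
    rw [List.map_map]; rfl
  have hgnodup : ∀ s ∈ vs.map pvGenes, s.Nodup := by
    intro s hs
    obtain ⟨v, _, rfl⟩ := List.mem_map.1 hs
    exact PySem.Set.nodup_discard _ _ (PySem.Set.nodup_ofList _)
  have hdel : pvCountSum ((vs.map pvFeat).map (fun f => f.1)) (vs.length : Int)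
      = pvPairsum computeDeletion vs := by
    rw [hmapg]
    have hN : (vs.length : Int) = ((vs.map pvGenes).length : Int) := by simp
    rw [hN]
    rw [pv_countsum_eq _ _ hgnodup]
    rw [show ((vs.map pvGenes).length : Int) = (((vs.map pvGenes).length : Nat) : Int) from rfl]
    rw [← pv_sym_main (vs.map pvGenes) (PySem.Set.ofList (vs.map pvGenes).flatten) hgnodup
      (PySem.Set.nodup_ofList _)
      (by intro s hs c hc
          exact (PySem.Set.mem_ofList _ _).2 (List.mem_flatten.2 ⟨s, hs, hc⟩))]
    rw [pv_pairsum_map pvGenes pvSymd vs]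
    rfl
  rw [hdel]
  -- duplication sum
  have hmapd : (vs.map pvFeat).map (fun f => f.2.1) = vs.map (fun s => (pvFeat s).2.1) := by
    rw [List.map_map]; rfl
  have hdBnodup : ∀ s ∈ vs.map (fun s => (pvFeat s).2.1), s.Nodup := by
    intro s hs
    obtain ⟨v, _, rfl⟩ := List.mem_map.1 hs
    exact pv_nodup_dupB v
  have hdAnodup : ∀ s ∈ vs.map pvDupA, s.Nodup := by
    intro s hs
    obtain ⟨v, _, rfl⟩ := List.mem_map.1 hs
    exact pv_nodup_dupA v
  have hdup : pvCountSum ((vs.map pvFeat).map (fun f => f.2.1)) (vs.length : Int)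
      = pvPairsum computeDuplication vs := by
    rw [hmapd]
    have hN : (vs.length : Int) = (((vs.map (fun s => (pvFeat s).2.1)).length : Nat) : Int) := by simp
    rw [hN]
    rw [pv_countsum_eq _ _ hdBnodup]
    rw [← pv_csum_bridge vs pvDupA (fun s => (pvFeat s).2.1) _
      (fun s y => by rw [pv_mem_dupA, pv_mem_dupB])
      (fun s => pv_nodup_dupA s) (fun s => pv_nodup_dupB s)]
    have hN2 : (((vs.map (fun s => (pvFeat s).2.1)).length : Nat) : Int)
        = (((vs.map pvDupA).length : Nat) : Int) := by simp
    rw [hN2]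
    rw [← pv_sym_main (vs.map pvDupA) (PySem.Set.ofList (vs.map pvDupA).flatten) hdAnodup
      (PySem.Set.nodup_ofList _)
      (by intro s hs c hc
          exact (PySem.Set.mem_ofList _ _).2 (List.mem_flatten.2 ⟨s, hs, hc⟩))]
    rw [pv_pairsum_map pvDupA pvSymd vs]
    rfl
  rw [hdup]
  -- split sum
  have hmapn : (vs.map pvFeat).map (fun f => f.2.2) = vs.map pvNumB := by
    rw [List.map_map]; rfl
  have hsplit : ((PySem.List.enumerate (PySem.List.sorted ((vs.map pvFeat).map (fun f => f.2.2)) (fun x => x))).foldl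
      (fun (st : Int × Int) p => (st.1 + p.1 * p.2 - st.2, st.2 + p.2)) (0, 0)).1
      = pvPairsum computeSplit vs := by
    rw [hmapn]
    set ns := PySem.List.sorted (vs.map pvNumB) (fun x => x) with hns
    have he := pv_enum_fold ns 0 0 0
    rw [he]
    simp only []
    have hsorted : ns.Pairwise (· ≤ ·) := by
      have := PySem.List.sorted_pairwise (vs.map pvNumB) (fun x => x)
      exact this
    have habs : pvPairsumSub ns = pvPairsum (fun a b => |a - b|) ns :=
      (pv_abs_sorted ns hsorted).symm
    have hperm : pvPairsum (fun a b => |a - b|) ns = pvPairsum (fun a b => |a - b|) (vs.map pvNumB) := by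
      have hp : ns.Perm (vs.map pvNumB) := PySem.List.sorted_perm _ _ _
      exact pv_pairsum_perm _ (fun a b => abs_sub_comm a b) hp
    have hms : pvPairsum (fun a b => |a - b|) (vs.map pvNumB) = pvPairsum computeSplit vs := by
      rw [pv_pairsum_map pvNumB (fun a b => |a - b|) vs]
      rfl
    rw [show (0 : Int) + pvPairsumSub ns + 0 * ns.sum - (ns.length : Int) * 0 = pvPairsumSub ns by ring]
    rw [habs, hperm, hms]
  rw [hsplit]
  -- distance part
  have hdist : (PySem.List.slice (vs.map pvFeat) none (some (-1))).foldl
      (fun (t : Int × Int × Int) f =>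
        (t.1 + ((geneSet.length : Int) - PySem.Set.len f.1), t.2.1, t.2.2 + |f.2.2 - 1|))
      (0, 0, 0)
      = ((vs.dropLast.map (fun s => (geneSet.length : Int) - ((pvGenes s).length : Int))).sum, 0,
         (vs.dropLast.map (fun s => |pvNumB s - 1|)).sum) := by
    rw [PySem.List.slice_to_neg_one, ← List.map_dropLast]
    rw [pv_foldl_dist]
    simp only [List.map_map]
    rw [Prod.mk.injEq, Prod.mk.injEq]
    refine ⟨by simp; rfl, rfl, by simp; rfl⟩
  rw [hdist]

-- ===== VERDICT (by name: the statement is the Claim_ definition above) =====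
theorem computePairWiseDistance_spec : Claim_equal_computePairWiseDistance := by
  intro dictionary geneSet _
  unfold Spec_computePairWiseDistance
  rw [pv_A_structural, pv_B_structural]
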